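-- pv_equiv track=rewrite | github.com/m-sirius-k/MoCKA | outbox/verify_pack/extract_20260222_081648/verify.py | build_chain
-- ===== SOURCE A (Python) =====
-- def build_chain(nodes):
--     forward = {}
--     genesis = []
--     for k, n in nodes.items():
--         prev = n["prev"]
--         if not prev or prev not in nodes:
--             genesis.append(k)
--         if prev:
--             forward.setdefault(prev, []).append(k)
--     if not genesis:
--         genesis = [next(iter(nodes.keys()))]
--     genesis.sort()
--     cur = genesis[0]
--     chain = [cur]
--     visited = set(chain)
--     while True:
--         nxts = forward.get(cur, [])
--         if not nxts:
--             break
--         nxts.sort()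
--         nxt = nxts[0]
--         if nxt in visited:
--             break
--         chain.append(nxt)
--         visited.add(nxt)
--         cur = nxt
--     return chain
-- ===== SOURCE B (Python) =====
-- def build_chain(nodes):
--     # No index structures at all: find the start and each successor by a direct
--     # scan over nodes; the chain itself serves as the visited set.
--     def min_child(cur):
--         if not cur:
--             return None  # a falsy id is never a parent link
--         best = None
--         for k, n in nodes.items():
--             if n["prev"] == cur and (best is None or k < best):
--                 best = k
--         return best
--
--     start = None
--     for k, n in nodes.items():
--         p = n["prev"]
--         if (not p or p not in nodes) and (start is None or k < start):
--             start = k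
--     if start is None:
--         start = next(iter(nodes))
--     chain = [start]
--     while True:
--         nxt = min_child(chain[-1])
--         if nxt is None or nxt in chain:
--             break
--         chain.append(nxt)
--     return chain
-- ===== Notes on version B (the rewrite author's own statement) =====
-- stated objective: alternative
-- what changed: B builds no index structures at all: it finds the start key and each step's successor by direct linear scans over nodes (min key whose prev equals the current key) and uses the chain itself as the visited set, instead of A's forward dict-of-lists, genesis list and per-step sorts.
import Mathlib
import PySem

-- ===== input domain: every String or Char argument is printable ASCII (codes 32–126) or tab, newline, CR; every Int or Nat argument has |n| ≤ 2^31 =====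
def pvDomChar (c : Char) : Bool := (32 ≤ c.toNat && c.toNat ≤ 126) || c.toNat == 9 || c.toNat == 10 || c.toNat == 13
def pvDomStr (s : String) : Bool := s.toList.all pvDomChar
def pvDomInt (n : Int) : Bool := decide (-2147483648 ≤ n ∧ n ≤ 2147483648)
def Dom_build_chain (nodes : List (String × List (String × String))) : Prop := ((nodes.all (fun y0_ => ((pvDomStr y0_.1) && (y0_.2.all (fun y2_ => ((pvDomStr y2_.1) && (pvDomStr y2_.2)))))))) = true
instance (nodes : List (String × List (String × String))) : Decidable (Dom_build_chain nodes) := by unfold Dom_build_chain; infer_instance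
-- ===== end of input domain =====

-- B builds no index structures: the start key and each step's successor are found by
-- direct linear scans over nodes, and the chain itself serves as the visited set;
-- same return value, no argument is mutated.

-- ===== PORT A =====
-- one loop iteration of A's first 'for' loop: state = (forward, genesis)
def stepA (nodes : List (String × List (String × String)))
    (st : PySem.Dict String (List String) × List String)
    (kn : String × List (String × String)) :
    PySem.Dict String (List String) × List String :=
  let prev := (PySem.Dict.mk kn.2).getD "prev" ""   -- n["prev"]; Pre_ guarantees the key exists
  let genesis := if prev = "" ∨ (PySem.Dict.mk nodes).contains prev = false
                 then st.2 ++ [kn.1] else st.2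
  let forward := if prev = "" then st.1 else st.1.modify prev [] (· ++ [kn.1])  -- setdefault+append
  (forward, genesis)

-- the 'while True' loop; fuel = len(nodes) bounds the iterations (each one appends a fresh key)
def walkA (forward : PySem.Dict String (List String)) :
    Nat → String → List String → PySem.Set String → List String
  | 0, _, chain, _ => chain
  | fuel+1, cur, chain, visited =>
    let nxts := forward.getD cur []
    if nxts = [] then chain
    else
      let nxt := (PySem.List.sorted nxts (fun x => x) false).headD ""
      if PySem.Set.contains visited nxt then chain
      else walkA forward fuel nxt (chain ++ [nxt]) (PySem.Set.add visited nxt)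

def build_chain (nodes : List (String × List (String × String))) : List String :=
  let fg := nodes.foldl (stepA nodes) (PySem.Dict.empty, [])
  let genesis := if fg.2 = [] then [(nodes.headD ("", [])).1] else fg.2  -- next(iter(nodes.keys())); Pre_: nodes ≠ []
  let genesis := PySem.List.sorted genesis (fun x => x) false
  let cur := genesis.headD ""
  walkA fg.1 nodes.length cur [cur] (PySem.Set.ofList [cur])

-- ===== PORT B =====
-- min_child(cur): linear scan for the smallest key whose "prev" equals cur
def minChild (nodes : List (String × List (String × String))) (cur : String) :
    Option String :=
  if cur = "" then none   -- a falsy id is never a parent link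
  else nodes.foldl (fun best kn =>
    if (PySem.Dict.mk kn.2).getD "prev" "" = cur then
      match best with
      | none => some kn.1
      | some b => if kn.1 < b then some kn.1 else best
    else best) none

-- the start-key scan: smallest genesis key (prev falsy or not a node key)
def startScan (nodes : List (String × List (String × String)))
    (st : Option String) (kn : String × List (String × String)) : Option String :=
  let p := (PySem.Dict.mk kn.2).getD "prev" ""
  if p = "" ∨ (PySem.Dict.mk nodes).contains p = false then
    match st with
    | none => some kn.1
    | some g => if kn.1 < g then some kn.1 else st
  else st

-- the 'while True' loop of B: only the chain is carried (chain[-1] is the cursor,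
-- 'nxt in chain' is the visited test); fuel = len(nodes)
def walkB (nodes : List (String × List (String × String))) :
    Nat → List String → List String
  | 0, chain => chain
  | fuel+1, chain =>
    match minChild nodes (chain.getLastD "") with
    | none => chain
    | some nxt => if nxt ∈ chain then chain else walkB nodes fuel (chain ++ [nxt])

def build_chain_alt (nodes : List (String × List (String × String))) : List String :=
  let start := match nodes.foldl (startScan nodes) none with
    | none => (nodes.headD ("", [])).1   -- next(iter(nodes)); Pre_: nodes ≠ []
    | some g => g
  walkB nodes nodes.length [start]

-- ===== PRECONDITION & SPEC =====
-- Pre_ excludes the empty dict (A raises StopIteration) and nodes without a "prev" key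
-- (A raises KeyError); the Nodup conditions exclude association lists with duplicate
-- keys, which do not represent a Python dict (a dict literal collapses them, so both
-- programs see the deduplicated dict and agree there).
def Pre_build_chain (nodes : List (String × List (String × String))) : Prop :=
  nodes ≠ [] ∧ (nodes.map Prod.fst).Nodup ∧
    ∀ p ∈ nodes, (p.2.map Prod.fst).Nodup ∧ "prev" ∈ p.2.map Prod.fst
instance (nodes : List (String × List (String × String))) : Decidable (Pre_build_chain nodes) := by unfold Pre_build_chain; infer_instance
def pvWitness_build_chain : (List (String × List (String × String))) :=
  [("a", [("prev", "")]), ("b", [("prev", "a")]), ("c", [("prev", "b")])]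
def Spec_build_chain (nodes : List (String × List (String × String))) (out : List String) : Prop := out = build_chain_alt nodes
instance (nodes : List (String × List (String × String))) (out : List String) : Decidable (Spec_build_chain nodes out) := by unfold Spec_build_chain; infer_instance

-- ===== CLAIM (what is proved, stated in full; the proofs are below) =====
def Claim_equal_build_chain : Prop := ∀ (nodes : List (String × List (String × String))), Dom_build_chain nodes → Pre_build_chain nodes → Spec_build_chain nodes (build_chain nodes)

-- ===== LEMMAS AND PROOFS =====

-- python min(l + [k]) in terms of min(l)
lemma min?_append_singleton (l : List String) (k : String) :
    PySem.List.min? (l ++ [k]) (fun x => x) =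
      some (match PySem.List.min? l (fun x => x) with
            | none => k
            | some m => if k < m then k else m) := by
  cases l with
  | nil => simp [PySem.List.min?]
  | cons x t =>
    rw [List.cons_append, PySem.List.min?_id_cons, PySem.List.min?_id_cons,
        List.foldl_append]
    simp only [List.foldl_cons, List.foldl_nil]
    rcases lt_or_ge k (t.foldl min x) with h | h
    · simp [le_of_lt h, h]
    · simp [h, not_lt.mpr h]

-- head of sorted(l) is min(l)
lemma head?_sorted_eq_min? (l : List String) :
    (PySem.List.sorted l (fun x => x) false).head? = PySem.List.min? l (fun x => x) := by
  cases h : PySem.List.sorted l (fun x => x) false with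
  | nil =>
    rw [PySem.List.sorted_eq_nil_iff] at h
    subst h; simp [PySem.List.min?]
  | cons m t =>
    have hm : m ∈ l := by
      rw [← PySem.List.mem_sorted (key := fun x => x) (rev := false), h]
      exact List.mem_cons_self
    have hle : ∀ y ∈ l, m ≤ y := PySem.List.key_head_sorted_le l (fun x => x) h
    have hne : l ≠ [] := by
      rintro rfl
      rw [Iff.mpr (PySem.List.sorted_eq_nil_iff [] (fun x => x) false) rfl] at h
      cases h
    obtain ⟨m', hm'⟩ : ∃ m', PySem.List.min? l (fun x => x) = some m' := by
      cases hmin : PySem.List.min? l (fun x => x) with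
      | none => exact absurd (Iff.mp (PySem.List.min?_eq_none_iff l (fun x => x)) hmin) hne
      | some v => exact ⟨v, rfl⟩
    have hmem' : m' ∈ l := PySem.List.min?_mem hm'
    have hmin' : ∀ y ∈ l, m' ≤ y := PySem.List.min?_isMin hm'
    rw [hm', List.head?_cons]
    exact congrArg some (le_antisymm (hle m' hmem') (hmin' m hm))

-- A's genesis list keeps B's start scan as its minimum
lemma gen_inv (nodes l : List (String × List (String × String)))
    (fw : PySem.Dict String (List String)) (gen : List String) (gm : Option String)
    (hg : PySem.List.min? gen (fun x => x) = gm) :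
    PySem.List.min? (l.foldl (stepA nodes) (fw, gen)).2 (fun x => x)
      = l.foldl (startScan nodes) gm := by
  induction l generalizing fw gen gm with
  | nil => exact hg
  | cons kn l ih =>
    simp only [List.foldl_cons, stepA, startScan]
    apply ih
    by_cases hc : (PySem.Dict.mk kn.2).getD "prev" "" = "" ∨
        (PySem.Dict.mk nodes).contains ((PySem.Dict.mk kn.2).getD "prev" "") = false
    · rw [if_pos hc, if_pos hc, min?_append_singleton, hg]
      cases gm with
      | none => rfl
      | some g => by_cases hlt : kn.1 < g <;> simp [hlt]
    · rw [if_neg hc, if_neg hc]; exact hg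

-- A's forward list at a nonempty key keeps B's min_child scan as its minimum
lemma fwd_inv (nodes l : List (String × List (String × String))) (c : String)
    (hc : c ≠ "")
    (fw : PySem.Dict String (List String)) (gen : List String) (b : Option String)
    (hf : PySem.List.min? (fw.getD c []) (fun x => x) = b) :
    PySem.List.min? ((l.foldl (stepA nodes) (fw, gen)).1.getD c []) (fun x => x)
      = l.foldl (fun best kn =>
          if (PySem.Dict.mk kn.2).getD "prev" "" = c then
            match best with
            | none => some kn.1
            | some m => if kn.1 < m then some kn.1 else best
          else best) b := by
  induction l generalizing fw gen b with
  | nil => exact hf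
  | cons kn l ih =>
    simp only [List.foldl_cons, stepA]
    apply ih
    by_cases hp : (PySem.Dict.mk kn.2).getD "prev" "" = ""
    · have : ¬ (PySem.Dict.mk kn.2).getD "prev" "" = c := by rw [hp]; exact fun e => hc e.symm
      simp only [if_pos hp, if_neg this]; exact hf
    · simp only [if_neg hp]
      by_cases he : (PySem.Dict.mk kn.2).getD "prev" "" = c
      · rw [if_pos he, ← he, PySem.Dict.getD_modify_self, min?_append_singleton, he, hf]
        cases b with
        | none => rfl
        | some m => by_cases hlt : kn.1 < m <;> simp [hlt]
      · rw [if_neg he, PySem.Dict.getD_modify_of_ne _ _ _ (fun e => he e.symm)]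
        exact hf
  

-- A's forward dict never gets an entry at the empty key
lemma fwd_empty (nodes l : List (String × List (String × String)))
    (fw : PySem.Dict String (List String)) (gen : List String)
    (h : fw.getD "" [] = []) :
    ((l.foldl (stepA nodes) (fw, gen)).1).getD "" [] = [] := by
  induction l generalizing fw gen with
  | nil => exact h
  | cons kn l ih =>
    simp only [List.foldl_cons, stepA]
    apply ih
    by_cases hp : (PySem.Dict.mk kn.2).getD "prev" "" = ""
    · simpa [hp] using h
    · rw [if_neg hp, PySem.Dict.getD_modify_of_ne _ _ _ (fun e => hp e.symm)]; exact h

-- the two walks agree when min_child gives the minimum of A's forward lists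
lemma walk_eq (nodes : List (String × List (String × String)))
    (fw : PySem.Dict String (List String))
    (h : ∀ c, PySem.List.min? (fw.getD c []) (fun x => x) = minChild nodes c)
    (fuel : Nat) (chain : List String) (visited : PySem.Set String)
    (hv : ∀ x, x ∈ visited ↔ x ∈ chain) :
    walkA fw fuel (chain.getLastD "") chain visited = walkB nodes fuel chain := by
  induction fuel generalizing chain visited with
  | zero => rfl
  | succ fuel ih =>
    simp only [walkA, walkB]
    cases hn : minChild nodes (chain.getLastD "") with
    | none =>
      have he : fw.getD (chain.getLastD "") [] = [] :=
        Iff.mp (PySem.List.min?_eq_none_iff _ _) (by rw [h _, hn])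
      rw [List.getLastD_eq_getLast?] at he
      simp [he]
    | some m =>
      have hmin : PySem.List.min? (fw.getD (chain.getLastD "") []) (fun x => x) = some m := by
        rw [h _, hn]
      have hne : fw.getD (chain.getLastD "") [] ≠ [] := by
        intro e
        rw [e, Iff.mpr (PySem.List.min?_eq_none_iff [] (fun x => x)) rfl] at hmin
        cases hmin
      have hhead : (PySem.List.sorted (fw.getD (chain.getLastD "") []) (fun x => x)
          false).headD "" = m := by
        rw [List.headD_eq_head?_getD, head?_sorted_eq_min?, hmin]; rfl
      rw [if_neg hne, hhead]
      by_cases hmem : m ∈ chain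
      · have : m ∈ visited := (hv m).mpr hmem
        simp [this, hmem]
      · have hnv : m ∉ visited := fun e => hmem ((hv m).mp e)
        have hlast : ((chain ++ [m]).getLastD "") = m := by
          simp
        rw [if_neg (by simpa using hnv)]
        simp only [hmem, if_false]
        have := ih (chain ++ [m]) (PySem.Set.add visited m)
          (by
            intro x
            rw [PySem.Set.add_of_not_mem hnv]
            simp only [List.mem_append, List.mem_singleton]
            constructor
            · rintro (hx | hx)
              · exact Or.inl ((hv x).mp hx)
              · exact Or.inr hx
            · rintro (hx | hx)
              · exact Or.inl ((hv x).mpr hx)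
              · exact Or.inr hx)
        rw [hlast] at this; exact this

-- ===== VERDICT (by name: the statement is the Claim_ definition above) =====
theorem build_chain_spec : Claim_equal_build_chain := by
  intro nodes _ _
  unfold Spec_build_chain build_chain build_chain_alt
  have hg := gen_inv nodes nodes PySem.Dict.empty [] none (by simp [PySem.List.min?])
  have hfw : ∀ c, PySem.List.min?
      ((nodes.foldl (stepA nodes) (PySem.Dict.empty, [])).1.getD c []) (fun x => x)
        = minChild nodes c := by
    intro c
    by_cases hc : c = ""
    · subst hc
      rw [fwd_empty nodes nodes PySem.Dict.empty [] (by simp [PySem.Dict.getD_empty])]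
      simp [PySem.List.min?, minChild]
    · rw [fwd_inv nodes nodes c hc PySem.Dict.empty [] none
        (by simp [PySem.Dict.getD_empty, PySem.List.min?])]
      simp [minChild, hc]
  have hstart :
      (PySem.List.sorted
          (if (nodes.foldl (stepA nodes) (PySem.Dict.empty, [])).2 = []
           then [(nodes.headD ("", [])).1]
           else (nodes.foldl (stepA nodes) (PySem.Dict.empty, [])).2)
          (fun x => x) false).headD ""
        = (match nodes.foldl (startScan nodes) none with
           | none => (nodes.headD ("", [])).1
           | some g => g) := by
    by_cases hgen : (nodes.foldl (stepA nodes) (PySem.Dict.empty, [])).2 = []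
    · have hb : nodes.foldl (startScan nodes) none = none := by
        rw [← hg, hgen]; simp [PySem.List.min?]
      rw [if_pos hgen, hb, List.headD_eq_head?_getD, head?_sorted_eq_min?,
          PySem.List.min?_id_cons]
      rfl
    · obtain ⟨g, hgsome⟩ :
          ∃ g, PySem.List.min? (nodes.foldl (stepA nodes) (PySem.Dict.empty, [])).2
                (fun x => x) = some g := by
        cases hmin : PySem.List.min? (nodes.foldl (stepA nodes) (PySem.Dict.empty, [])).2
            (fun x => x) with
        | none => exact absurd (Iff.mp (PySem.List.min?_eq_none_iff _ _) hmin) hgen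
        | some v => exact ⟨v, rfl⟩
      have hb : nodes.foldl (startScan nodes) none = some g := by rw [← hg, hgsome]
      rw [if_neg hgen, hb, List.headD_eq_head?_getD, head?_sorted_eq_min?, hgsome]
      rfl
  simp only [hstart]
  have := walk_eq nodes _ hfw nodes.length
      [match nodes.foldl (startScan nodes) none with
       | none => (nodes.headD ("", [])).1
       | some g => g]
      (PySem.Set.ofList [match nodes.foldl (startScan nodes) none with
       | none => (nodes.headD ("", [])).1
       | some g => g])
      (by intro x; simp [PySem.Set.ofList, PySem.Set.add])
  simpa using this
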